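-- pv_equiv track=rewrite | github.com/isaac60103/text_summary | attentive_reader/data_utility/word2vec_utility.py | generate_label
-- ===== SOURCE A (Python) =====
-- def generate_label(data, dictionary, windowsize = 2):
--
--     labels = {}
--
--     for vocab in range(len(dictionary)):
--
--         labels[vocab] = []
--         match = [i for i,x in enumerate(data) if x==vocab]
--
--         for m in match:
--             for w in range(1,windowsize):
--
--                 fw = m-w
--                 bw = m+w
--
--                 if fw > 0 : labels[vocab].append(data[fw])
--                 if bw < len(data): labels[vocab].append(data[bw])
--
--     return labels
-- ===== SOURCE B (Python) =====
-- def generate_label(data, dictionary, windowsize=2):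
--     # One pass over data instead of one scan of data per vocabulary entry.
--     n = len(data)
--     labels = {v: [] for v in range(len(dictionary))}
--     for i, x in enumerate(data):
--         if 0 <= x < len(dictionary):
--             ctx = labels[x]
--             for w in range(1, windowsize):
--                 if i - w > 0:
--                     ctx.append(data[i - w])
--                 if i + w < n:
--                     ctx.append(data[i + w])
--     return labels
-- ===== Notes on version B (the rewrite author's own statement) =====
-- stated objective: faster
-- what changed: Instead of scanning all of data once per vocabulary index (V nested scans plus a window pass per match), B initialises all vocabulary keys once and makes a single pass over data, appending each position's window context directly to the bucket of the word found there.
import Mathlib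
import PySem

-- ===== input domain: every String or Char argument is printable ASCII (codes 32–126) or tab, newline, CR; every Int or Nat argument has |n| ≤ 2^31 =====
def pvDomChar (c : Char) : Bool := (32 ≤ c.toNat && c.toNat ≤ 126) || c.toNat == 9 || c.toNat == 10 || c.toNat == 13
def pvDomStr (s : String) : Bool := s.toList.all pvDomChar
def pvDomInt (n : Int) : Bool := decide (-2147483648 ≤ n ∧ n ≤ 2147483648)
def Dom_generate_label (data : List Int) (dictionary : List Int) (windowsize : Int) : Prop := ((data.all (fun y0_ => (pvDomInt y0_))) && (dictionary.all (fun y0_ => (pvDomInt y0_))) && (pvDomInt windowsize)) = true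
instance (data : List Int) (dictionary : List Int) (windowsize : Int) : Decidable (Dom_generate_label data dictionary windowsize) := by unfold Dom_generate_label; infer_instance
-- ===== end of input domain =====

-- B replaces A's per-vocabulary scans of data by one vocabulary-key initialisation plus a single
-- pass over data that appends each position's window context to the bucket of the word found there.

-- ===== PORT A =====
-- A's labels[vocab].append(data[fw]) / (data[bw]): the guards fw > 0 / bw < len(data) keep the
-- index in range (fw = m-w with w ≥ 1 and m a valid index, bw likewise), so data[..] never
-- raises; pyGetD's default 0 is never used.
def generate_label (data : List Int) (dictionary : List Int) (windowsize : Int) : List (Int × List Int) :=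
  let labels : PySem.Dict Int (List Int) :=
    (PySem.List.pyRange 0 (dictionary.length : Int) 1).foldl (fun labels vocab =>
      let labels := labels.insert vocab ([] : List Int)
      let m := ((PySem.List.enumerate data).filter (fun p => p.2 == vocab)).map (·.1)
      m.foldl (fun labels m =>
        (PySem.List.pyRange 1 windowsize 1).foldl (fun labels w =>
          let fw := m - w
          let bw := m + w
          let labels := if fw > 0 then labels.modify vocab [] (fun l => l ++ [PySem.List.pyGetD data fw 0]) else labels
          if bw < (data.length : Int) then labels.modify vocab [] (fun l => l ++ [PySem.List.pyGetD data bw 0]) else labels)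
          labels) labels)
      PySem.Dict.empty
  labels.items

-- ===== PORT B =====
-- B's `ctx = labels[x]; ctx.append(...)` mutates the bucket of key x in place; ported as
-- Dict.modify at key x, which is the same dict after each append.
def generate_label_alt (data : List Int) (dictionary : List Int) (windowsize : Int) : List (Int × List Int) :=
  let n : Int := data.length
  let init : PySem.Dict Int (List Int) :=
    (PySem.List.pyRange 0 (dictionary.length : Int) 1).foldl (fun d v => d.insert v ([] : List Int)) PySem.Dict.empty
  let labels :=
    (PySem.List.enumerate data).foldl (fun d p =>
      if 0 ≤ p.2 ∧ p.2 < (dictionary.length : Int) then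
        (PySem.List.pyRange 1 windowsize 1).foldl (fun d w =>
          let d := if p.1 - w > 0 then d.modify p.2 [] (fun l => l ++ [PySem.List.pyGetD data (p.1 - w) 0]) else d
          if p.1 + w < n then d.modify p.2 [] (fun l => l ++ [PySem.List.pyGetD data (p.1 + w) 0]) else d)
          d
      else d)
      init
  labels.items

-- ===== PRECONDITION & SPEC =====
def Spec_generate_label (data : List Int) (dictionary : List Int) (windowsize : Int) (out : List (Int × List Int)) : Prop := out = generate_label_alt data dictionary windowsize
instance (data : List Int) (dictionary : List Int) (windowsize : Int) (out : List (Int × List Int)) : Decidable (Spec_generate_label data dictionary windowsize out) := by unfold Spec_generate_label; infer_instance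

-- ===== CLAIM (what is proved, stated in full; the proofs are below) =====
def Claim_equal_generate_label : Prop := ∀ (data : List Int) (dictionary : List Int) (windowsize : Int), Dom_generate_label data dictionary windowsize → Spec_generate_label data dictionary windowsize (generate_label data dictionary windowsize)

-- ===== LEMMAS AND PROOFS =====

-- A dict whose items are the keys `ks` paired with `g k`.
def DD (ks : List Int) (g : Int → List Int) : PySem.Dict Int (List Int) := PySem.Dict.mk (ks.map (fun v => (v, g v)))

theorem DD_congr {ks : List Int} {g g' : Int → List Int} (h : ∀ v ∈ ks, g v = g' v) :
    DD ks g = DD ks g' := by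
  unfold DD
  congr 1
  exact List.map_congr_left (fun v hv => by rw [h v hv])

theorem keys_DD (ks : List Int) (g : Int → List Int) : (DD ks g).keys = ks := by
  show (ks.map (fun v => (v, g v))).map (·.1) = ks
  simp [Function.comp_def]

theorem getD_DD {ks : List Int} (g : Int → List Int) {k : Int} (hnd : ks.Nodup) (hk : k ∈ ks) :
    (DD ks g).getD k [] = g k := by
  apply PySem.Dict.getD_of_mem_items
  · show (k, g k) ∈ ks.map (fun v => (v, g v))
    exact List.mem_map_of_mem hk
  · rw [keys_DD]; exact hnd

theorem insert_DD_fresh {ks : List Int} (g : Int → List Int) {k : Int} (hk : k ∉ ks) (val : List Int) :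
    (DD ks g).insert k val = DD (ks ++ [k]) (fun v => if v = k then val else g v) := by
  apply PySem.Dict.ext
  rw [PySem.Dict.items_insert_of_not_contains]
  · show (ks.map (fun v => (v, g v))) ++ [(k, val)]
        = (ks ++ [k]).map (fun v => (v, if v = k then val else g v))
    rw [List.map_append]
    congr 1
    · exact (List.map_congr_left (fun v hv => by
        have : v ≠ k := fun h => hk (h ▸ hv)
        simp [this])).symm
    · simp
  · rw [← Bool.not_eq_true, PySem.Dict.contains_iff_mem_keys, keys_DD]
    exact hk

theorem modify_DD {ks : List Int} (g : Int → List Int) {k : Int} (hnd : ks.Nodup) (hk : k ∈ ks) (t : List Int) :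
    (DD ks g).modify k [] (fun l => l ++ t) = DD ks (fun v => if v = k then g v ++ t else g v) := by
  have hc : (DD ks g).contains k = true := by
    rw [PySem.Dict.contains_iff_mem_keys, keys_DD]; exact hk
  show (DD ks g).insert k (((DD ks g).getD k []) ++ t) = _
  rw [getD_DD g hnd hk]
  apply PySem.Dict.ext
  rw [PySem.Dict.items_insert_of_contains _ _ hc]
  show List.map _ (ks.map (fun v => (v, g v))) = ks.map (fun v => (v, if v = k then g v ++ t else g v))
  rw [List.map_map]
  apply List.map_congr_left
  intro v hv
  by_cases hvk : v = k <;> simp [hvk]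

-- the window-context list produced at data position i
def winCtx (data : List Int) (windowsize : Int) (i : Int) : List Int :=
  (PySem.List.pyRange 1 windowsize 1).flatMap (fun w =>
    (if i - w > 0 then [PySem.List.pyGetD data (i - w) 0] else []) ++
    (if i + w < (data.length : Int) then [PySem.List.pyGetD data (i + w) 0] else []))

-- the full context list for vocabulary index v
def ctxOf (data : List Int) (windowsize : Int) (v : Int) : List Int :=
  ((PySem.List.enumerate data).filter (fun p => p.2 == v)).flatMap (fun p => winCtx data windowsize p.1)

-- the common inner window loop, folded over an arbitrary list of offsets
theorem winfoldL (data : List Int) {ks : List Int} (L : List Int) (g : Int → List Int) {k : Int}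
    (hnd : ks.Nodup) (hk : k ∈ ks) (i : Int) :
    L.foldl (fun d w =>
        let d := if i - w > 0 then d.modify k [] (fun l => l ++ [PySem.List.pyGetD data (i - w) 0]) else d
        if i + w < (data.length : Int) then d.modify k [] (fun l => l ++ [PySem.List.pyGetD data (i + w) 0]) else d)
      (DD ks g)
    = DD ks (fun v => if v = k then g v ++ L.flatMap (fun w =>
        (if i - w > 0 then [PySem.List.pyGetD data (i - w) 0] else []) ++
        (if i + w < (data.length : Int) then [PySem.List.pyGetD data (i + w) 0] else [])) else g v) := by
  induction L generalizing g with
  | nil =>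
      simp only [List.foldl_nil, List.flatMap_nil]
      exact DD_congr (fun v _ => by by_cases h : v = k <;> simp [h])
  | cons w L ih =>
      simp only [List.foldl_cons, List.flatMap_cons]
      have step : (let d := if i - w > 0 then (DD ks g).modify k [] (fun l => l ++ [PySem.List.pyGetD data (i - w) 0]) else DD ks g
          if i + w < (data.length : Int) then d.modify k [] (fun l => l ++ [PySem.List.pyGetD data (i + w) 0]) else d)
          = DD ks (fun v => if v = k then g v ++
              ((if i - w > 0 then [PySem.List.pyGetD data (i - w) 0] else []) ++
               (if i + w < (data.length : Int) then [PySem.List.pyGetD data (i + w) 0] else [])) else g v) := by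
        by_cases h1 : i - w > 0 <;> by_cases h2 : i + w < (data.length : Int) <;>
          simp only [h1, h2, if_true, if_false, modify_DD _ hnd hk] <;>
          exact DD_congr (fun v _ => by by_cases hv : v = k <;> simp [hv])
      rw [step, ih]
      exact DD_congr (fun v _ => by by_cases hv : v = k <;> simp [hv])

-- ===== A-side characterisation =====

theorem matchfoldL (data : List Int) (windowsize : Int) {ks : List Int} (M : List Int)
    (g : Int → List Int) {k : Int} (hnd : ks.Nodup) (hk : k ∈ ks) :
    M.foldl (fun labels m =>
        (PySem.List.pyRange 1 windowsize 1).foldl (fun labels w =>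
          let fw := m - w
          let bw := m + w
          let labels := if fw > 0 then labels.modify k [] (fun l => l ++ [PySem.List.pyGetD data fw 0]) else labels
          if bw < (data.length : Int) then labels.modify k [] (fun l => l ++ [PySem.List.pyGetD data bw 0]) else labels)
          labels)
      (DD ks g)
    = DD ks (fun v => if v = k then g v ++ M.flatMap (fun m => winCtx data windowsize m) else g v) := by
  induction M generalizing g with
  | nil =>
      simp only [List.foldl_nil, List.flatMap_nil]
      exact DD_congr (fun v _ => by by_cases h : v = k <;> simp [h])
  | cons m M ih =>
      simp only [List.foldl_cons]
      rw [winfoldL data (PySem.List.pyRange 1 windowsize 1) g hnd hk m, ih]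
      exact DD_congr (fun v _ => by by_cases hv : v = k <;> simp [hv, winCtx])

theorem A_outer (data : List Int) (windowsize : Int) (b : Int) (hb : 0 ≤ b) :
    (PySem.List.pyRange 0 b 1).foldl (fun labels vocab =>
      let labels := labels.insert vocab ([] : List Int)
      let m := ((PySem.List.enumerate data).filter (fun p => p.2 == vocab)).map (·.1)
      m.foldl (fun labels m =>
        (PySem.List.pyRange 1 windowsize 1).foldl (fun labels w =>
          let fw := m - w
          let bw := m + w
          let labels := if fw > 0 then labels.modify vocab [] (fun l => l ++ [PySem.List.pyGetD data fw 0]) else labels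
          if bw < (data.length : Int) then labels.modify vocab [] (fun l => l ++ [PySem.List.pyGetD data bw 0]) else labels)
          labels) labels)
      PySem.Dict.empty
    = DD (PySem.List.pyRange 0 b 1) (ctxOf data windowsize) := by
  induction b, hb using Int.le_induction with
  | base =>
      simp [PySem.List.pyRange_one_eq_nil le_rfl, DD, PySem.Dict.empty]
  | succ b hb ih =>
      rw [PySem.List.pyRange_one_succ_right hb, List.foldl_append, ih]
      simp only [List.foldl_cons, List.foldl_nil]
      have hfresh : b ∉ PySem.List.pyRange 0 b 1 := by
        rw [PySem.List.mem_pyRange_one]; omega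
      have hnd : (PySem.List.pyRange 0 b 1 ++ [b]).Nodup := by
        rw [← PySem.List.pyRange_one_succ_right hb]
        exact PySem.List.nodup_pyRange_one 0 (b + 1)
      have hk : b ∈ PySem.List.pyRange 0 b 1 ++ [b] := by simp
      rw [insert_DD_fresh _ hfresh]
      rw [matchfoldL data windowsize _ _ hnd hk]
      refine DD_congr (fun v hv => ?_)
      by_cases hvb : v = b
      · subst hvb
        simp [ctxOf, List.flatMap_map]
      · simp [hvb]

-- ===== B-side characterisation =====

theorem B_init (b : Int) (hb : 0 ≤ b) :
    (PySem.List.pyRange 0 b 1).foldl (fun d v => d.insert v ([] : List Int)) PySem.Dict.empty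
    = DD (PySem.List.pyRange 0 b 1) (fun _ => []) := by
  induction b, hb using Int.le_induction with
  | base => simp [PySem.List.pyRange_one_eq_nil le_rfl, DD, PySem.Dict.empty]
  | succ b hb ih =>
      rw [PySem.List.pyRange_one_succ_right hb, List.foldl_append, ih]
      simp only [List.foldl_cons, List.foldl_nil]
      have hfresh : b ∉ PySem.List.pyRange 0 b 1 := by
        rw [PySem.List.mem_pyRange_one]; omega
      rw [insert_DD_fresh _ hfresh]
      exact DD_congr (fun v _ => by by_cases h : v = b <;> simp [h])

theorem B_fold (data : List Int) (dictionary : List Int) (windowsize : Int)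
    (E : List (Int × Int)) (g : Int → List Int) :
    E.foldl (fun d p =>
      if 0 ≤ p.2 ∧ p.2 < (dictionary.length : Int) then
        (PySem.List.pyRange 1 windowsize 1).foldl (fun d w =>
          let d := if p.1 - w > 0 then d.modify p.2 [] (fun l => l ++ [PySem.List.pyGetD data (p.1 - w) 0]) else d
          if p.1 + w < (data.length : Int) then d.modify p.2 [] (fun l => l ++ [PySem.List.pyGetD data (p.1 + w) 0]) else d)
          d
      else d)
      (DD (PySem.List.pyRange 0 (dictionary.length : Int) 1) g)
    = DD (PySem.List.pyRange 0 (dictionary.length : Int) 1)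
        (fun v => g v ++ (E.filter (fun p => p.2 == v)).flatMap (fun p => winCtx data windowsize p.1)) := by
  induction E generalizing g with
  | nil =>
      simp only [List.foldl_nil, List.filter_nil, List.flatMap_nil]
      exact DD_congr (fun v _ => by simp)
  | cons p E ih =>
      simp only [List.foldl_cons]
      by_cases hp : 0 ≤ p.2 ∧ p.2 < (dictionary.length : Int)
      · have hk : p.2 ∈ PySem.List.pyRange 0 (dictionary.length : Int) 1 := by
          rw [PySem.List.mem_pyRange_one]; exact hp
        rw [if_pos hp,
          winfoldL data (PySem.List.pyRange 1 windowsize 1) g (PySem.List.nodup_pyRange_one 0 _) hk p.1, ih]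
        refine DD_congr (fun v hv => ?_)
        by_cases hv2 : p.2 = v
        · simp [hv2.symm, winCtx, List.append_assoc]
        · have : (p.2 == v) = false := by simp [hv2]
          have hne : v ≠ p.2 := fun h => hv2 h.symm
          simp [this, hne]
      · rw [if_neg hp, ih]
        refine DD_congr (fun v hv => ?_)
        have hv' : 0 ≤ v ∧ v < (dictionary.length : Int) := (PySem.List.mem_pyRange_one).1 hv
        have : (p.2 == v) = false := by
          simp only [beq_eq_false_iff_ne, ne_eq]
          intro h; exact hp (h ▸ hv')
        simp [this]

-- ===== VERDICT (by name: the statement is the Claim_ definition above) =====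
theorem generate_label_spec : Claim_equal_generate_label := by
  intro data dictionary windowsize _
  unfold Spec_generate_label generate_label generate_label_alt
  dsimp only []
  rw [A_outer data windowsize (dictionary.length : Int) (by positivity),
      B_init (dictionary.length : Int) (by positivity),
      B_fold data dictionary windowsize]
  exact congrArg PySem.Dict.items (DD_congr (fun v _ => by simp [ctxOf])).symm
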